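-- pv_equiv track=rewrite | github.com/wdarocha/pdb-parser | src/pdb_parser/reordering/vertex_ordering.py | resolve_atom_name
-- ===== SOURCE A (Python) =====
-- ATOM_ALIAS_MAP: dict[str, tuple[str, ...]] = {
-- 	"HN": ("H1", "H", "HD2", "HD3"),
-- 	"HA": ("HA", "HA2", "HA3"),
-- }
--
-- def get_atoms_of_residue(
-- 	residue_id: int,
-- 	available_atoms: list[tuple[int, str]],
-- ) -> set[str]:
-- 	"""
-- 	Return the atom names that belong to one residue.
--
-- 	Parameters
-- 	----------
-- 	residue_id : int
-- 		Target residue ID.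
-- 	available_atoms : list[tuple[int, str]]
-- 		List of (residue_id, atom_name).
--
-- 	Returns
-- 	-------
-- 	set[str]
-- 		Set of atom names present in the residue.
-- 	"""
-- 	return {
-- 		atom_name
-- 		for current_residue_id, atom_name in available_atoms
-- 		if current_residue_id == residue_id
-- 	}
--
-- def resolve_atom_name(
-- 	atom_name: str,
-- 	residue_id: int,
-- 	available_atoms: list[tuple[int, str]] | None = None,
-- ) -> str:
-- 	"""
-- 	Resolve atom aliases according to the atoms available in the target residue.
--
-- 	HN -> H1, H, HD2, HD3
-- 	HA -> HA, HA2, HA3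
--
-- 	Parameters
-- 	----------
-- 	atom_name : str
-- 		Base atom label from the clique pattern.
-- 	residue_id : int
-- 		Residue ID where the atom must be resolved.
-- 	available_atoms : list[tuple[int, str]] | None
-- 		List of (residue_id, atom_name).
--
-- 	Returns
-- 	-------
-- 	str
-- 		Resolved atom name.
-- 	"""
-- 	if available_atoms is None:
-- 		return atom_name
--
-- 	candidate_atoms = ATOM_ALIAS_MAP.get(atom_name)
-- 	if candidate_atoms is None:
-- 		return atom_name
--
-- 	residue_atoms = get_atoms_of_residue(residue_id, available_atoms)
--
-- 	for candidate_atom in candidate_atoms: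
-- 		if candidate_atom in residue_atoms:
-- 			return candidate_atom
--
-- 	return atom_name
-- ===== SOURCE B (Python) =====
-- ATOM_ALIAS_MAP: dict[str, tuple[str, ...]] = {
-- 	"HN": ("H1", "H", "HD2", "HD3"),
-- 	"HA": ("HA", "HA2", "HA3"),
-- }
--
-- def resolve_atom_name(atom_name, residue_id, available_atoms=None):
-- 	if available_atoms is None:
-- 		return atom_name
-- 	candidates = ATOM_ALIAS_MAP.get(atom_name)
-- 	if candidates is None:
-- 		return atom_name
-- 	# single pass over available_atoms, tracking the smallest candidate index seen
-- 	best = len(candidates)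
-- 	for rid, name in available_atoms:
-- 		if rid == residue_id and name in candidates:
-- 			best = min(best, candidates.index(name))
-- 	return candidates[best] if best < len(candidates) else atom_name
-- ===== Notes on version B (the rewrite author's own statement) =====
-- stated objective: alternative
-- what changed: Inverts the iteration: instead of building the residue's atom set and then looping over alias candidates, B makes one pass over available_atoms keeping the minimum candidate index of any matching atom in the residue, then returns candidates[best] (or atom_name if none matched).
import Mathlib
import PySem

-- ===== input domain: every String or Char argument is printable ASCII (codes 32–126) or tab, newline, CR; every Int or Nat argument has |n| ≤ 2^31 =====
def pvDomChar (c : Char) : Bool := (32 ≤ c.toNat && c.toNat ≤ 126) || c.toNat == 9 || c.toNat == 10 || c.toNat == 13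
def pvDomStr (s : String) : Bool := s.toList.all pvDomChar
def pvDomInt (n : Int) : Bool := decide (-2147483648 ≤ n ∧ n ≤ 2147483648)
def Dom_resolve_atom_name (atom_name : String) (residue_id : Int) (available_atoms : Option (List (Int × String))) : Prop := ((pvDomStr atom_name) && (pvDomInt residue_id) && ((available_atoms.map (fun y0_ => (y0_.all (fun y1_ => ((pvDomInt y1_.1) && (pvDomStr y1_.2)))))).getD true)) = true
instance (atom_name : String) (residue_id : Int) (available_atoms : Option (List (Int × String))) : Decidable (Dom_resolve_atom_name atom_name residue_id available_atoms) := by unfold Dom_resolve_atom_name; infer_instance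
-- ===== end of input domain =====

-- B inverts the iteration: one pass over available_atoms keeping the minimum matching
-- candidate index, instead of A's residue-atom set + candidate loop (objective: alternative).

-- ===== PORT A =====
def ATOM_ALIAS_MAP : PySem.Dict String (List String) :=
  PySem.Dict.ofList [("HN", ["H1", "H", "HD2", "HD3"]), ("HA", ["HA", "HA2", "HA3"])]

def get_atoms_of_residue (residue_id : Int) (available_atoms : List (Int × String)) : PySem.Set String :=
  PySem.Set.ofList ((available_atoms.filter (fun p => p.1 == residue_id)).map (fun p => p.2))

-- the 'for candidate_atom in candidate_atoms' loop with early return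
def pvFirstInSet (cands : List String) (residue_atoms : PySem.Set String) (atom_name : String) : String :=
  match cands with
  | [] => atom_name
  | c :: rest => if PySem.Set.contains residue_atoms c then c else pvFirstInSet rest residue_atoms atom_name

def resolve_atom_name (atom_name : String) (residue_id : Int) (available_atoms : Option (List (Int × String))) : String :=
  match available_atoms with
  | none => atom_name
  | some atoms =>
    match ATOM_ALIAS_MAP.get? atom_name with
    | none => atom_name
    | some candidate_atoms =>
      let residue_atoms := get_atoms_of_residue residue_id atoms
      pvFirstInSet candidate_atoms residue_atoms atom_name

-- ===== PORT B =====
-- 'candidates.index(name)' is List.idxOf; it is only reached when 'name in candidates',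
-- where the two agree (no ValueError possible).
def resolve_atom_name_alt (atom_name : String) (residue_id : Int) (available_atoms : Option (List (Int × String))) : String :=
  match available_atoms with
  | none => atom_name
  | some atoms =>
    match ATOM_ALIAS_MAP.get? atom_name with
    | none => atom_name
    | some candidates =>
      let best := atoms.foldl
        (fun b p => if p.1 == residue_id && candidates.contains p.2
                    then min b (candidates.idxOf p.2) else b) candidates.length
      if best < candidates.length then candidates.getD best atom_name else atom_name

-- ===== PRECONDITION & SPEC =====
def Spec_resolve_atom_name (atom_name : String) (residue_id : Int) (available_atoms : Option (List (Int × String))) (out : String) : Prop := out = resolve_atom_name_alt atom_name residue_id available_atoms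
instance (atom_name : String) (residue_id : Int) (available_atoms : Option (List (Int × String))) (out : String) : Decidable (Spec_resolve_atom_name atom_name residue_id available_atoms out) := by unfold Spec_resolve_atom_name; infer_instance

-- ===== CLAIM (what is proved, stated in full; the proofs are below) =====
def Claim_equal_resolve_atom_name : Prop := ∀ (atom_name : String) (residue_id : Int) (available_atoms : Option (List (Int × String))), Dom_resolve_atom_name atom_name residue_id available_atoms → Spec_resolve_atom_name atom_name residue_id available_atoms (resolve_atom_name atom_name residue_id available_atoms)

-- ===== LEMMAS AND PROOFS =====

-- membership in the residue's atom set = a direct scan of available_atoms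
lemma contains_get_atoms (residue_id : Int) (atoms : List (Int × String)) (c : String) :
    PySem.Set.contains (get_atoms_of_residue residue_id atoms) c
      = atoms.any (fun p => p.1 == residue_id && p.2 == c) := by
  rw [Bool.eq_iff_iff]
  simp [get_atoms_of_residue, PySem.Set.contains, PySem.Set.mem_ofList, List.any_eq_true]

-- A's candidate loop equals find? of the pointwise-equal predicate
lemma firstInSet_eq_find (cands : List String) (s : PySem.Set String) (a : String)
    (q : String → Bool) (h : ∀ c, PySem.Set.contains s c = q c) :
    pvFirstInSet cands s a = ((cands.find? q).elim a id) := by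
  induction cands with
  | nil => rfl
  | cons c rest ih =>
    simp only [pvFirstInSet, List.find?, h c]
    cases hq : q c <;> simp [ih]

-- B's fold step, abbreviated
def pvStep (rid : Int) (cands : List String) (b : Nat) (p : Int × String) : Nat :=
  if p.1 == rid && cands.contains p.2 then min b (cands.idxOf p.2) else b

lemma pvStep_le (rid : Int) (cands : List String) (b : Nat) (p : Int × String) :
    pvStep rid cands b p ≤ b := by
  unfold pvStep; split
  · exact Nat.min_le_left _ _
  · exact Nat.le_refl _

lemma foldl_step_le (rid : Int) (cands : List String) :
    ∀ (atoms : List (Int × String)) (b : Nat), atoms.foldl (pvStep rid cands) b ≤ b := by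
  intro atoms
  induction atoms with
  | nil => intro b; exact Nat.le_refl _
  | cons p atoms ih =>
    intro b
    exact Nat.le_trans (ih (pvStep rid cands b p)) (pvStep_le rid cands b p)

-- factoring the accumulator out of B's min-fold
lemma foldl_step_min (rid : Int) (cands : List String) :
    ∀ (atoms : List (Int × String)) (b : Nat), b ≤ cands.length →
      atoms.foldl (pvStep rid cands) b = min b (atoms.foldl (pvStep rid cands) cands.length) := by
  intro atoms
  induction atoms with
  | nil =>
    intro b hb
    simpa using (Nat.min_eq_left hb).symm
  | cons p atoms ih =>
    intro b hb
    simp only [List.foldl_cons]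
    rw [ih (pvStep rid cands b p) (Nat.le_trans (pvStep_le rid cands b p) hb),
        ih (pvStep rid cands cands.length p) (pvStep_le rid cands cands.length p)]
    have hM := foldl_step_le rid cands atoms cands.length
    unfold pvStep
    by_cases hc : (p.1 == rid && cands.contains p.2) = true
    · have hmem : p.2 ∈ cands := by
        have := (Bool.and_eq_true _ _).mp hc
        simpa using this.2
      have hm : cands.idxOf p.2 < cands.length := List.idxOf_lt_length_of_mem hmem
      simp only [hc, if_pos]
      omega
    · simp only [hc, if_neg, Bool.false_eq_true, not_false_eq_true]
      omega

-- findIdx of a disjunction is the min of the findIdx's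
lemma findIdx_or_min {α : Type} (a b : α → Bool) :
    ∀ (l : List α), l.findIdx (fun x => a x || b x) = min (l.findIdx a) (l.findIdx b) := by
  intro l
  induction l with
  | nil => rfl
  | cons x t ih =>
    simp only [List.findIdx_cons]
    cases ha : a x <;> cases hb : b x <;>
      simp only [Bool.or_true, Bool.or_false, cond_true, cond_false, ih] <;> omega

-- one atom's contribution: findIdx of its single-pair predicate is the step from length
lemma step_len_eq_findIdx (rid : Int) (cands : List String) (p : Int × String) :
    pvStep rid cands cands.length p
      = cands.findIdx (fun c => p.1 == rid && p.2 == c) := by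
  unfold pvStep
  by_cases hr : (p.1 == rid) = true
  · have hpred : (fun c => p.1 == rid && p.2 == c) = (fun c => c == p.2) := by
      funext c
      simp only [hr, Bool.true_and]
      by_cases h : p.2 = c
      · subst h; simp
      · simp [beq_iff_eq, h, Ne.symm h]
    rw [hpred]
    have hidx : cands.findIdx (fun c => c == p.2) = cands.idxOf p.2 := rfl
    rw [hidx]
    by_cases hmem : p.2 ∈ cands
    · have hco : cands.contains p.2 = true := by simpa using hmem
      simp [hr, hco, Nat.min_eq_right (Nat.le_of_lt (List.idxOf_lt_length_of_mem hmem))]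
      exact fun h => absurd hmem h
    · have hco : cands.contains p.2 = false := by simpa using hmem
      simp [hr, hco, List.idxOf_eq_length hmem]
  · have hr' : (p.1 == rid) = false := by simpa using hr
    simp only [hr', Bool.false_and, Bool.false_eq_true, if_neg, not_false_eq_true]
    symm
    exact List.findIdx_eq_length.mpr (fun x _ => rfl)

-- the fold over available_atoms computes findIdx of the "present in residue" predicate
lemma foldl_eq_findIdx (rid : Int) (cands : List String) :
    ∀ (atoms : List (Int × String)),
      atoms.foldl (pvStep rid cands) cands.length
        = cands.findIdx (fun c => atoms.any (fun p => p.1 == rid && p.2 == c)) := by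
  intro atoms
  induction atoms with
  | nil =>
    symm
    exact List.findIdx_eq_length.mpr (fun x _ => rfl)
  | cons p atoms ih =>
    simp only [List.foldl_cons]
    rw [foldl_step_min rid cands atoms (pvStep rid cands cands.length p)
          (pvStep_le rid cands cands.length p), ih]
    have : (fun c => (p :: atoms).any (fun q => q.1 == rid && q.2 == c))
        = (fun c => (p.1 == rid && p.2 == c) || atoms.any (fun q => q.1 == rid && q.2 == c)) := by
      funext c; simp
    rw [this, findIdx_or_min, step_len_eq_findIdx]

-- turn "findIdx + index" into "find?"
lemma findIdx_getD_eq_find {α : Type} (q : α → Bool) (a : α) :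
    ∀ (l : List α),
      (if l.findIdx q < l.length then l.getD (l.findIdx q) a else a) = ((l.find? q).elim a id) := by
  intro l
  induction l with
  | nil => rfl
  | cons x t ih =>
    simp only [List.findIdx_cons, List.find?, List.length_cons]
    cases hx : q x
    · simp only [cond_false, Nat.succ_lt_succ_iff, List.getD_cons_succ]
      exact ih
    · simp

-- ===== VERDICT (by name: the statement is the Claim_ definition above) =====
theorem resolve_atom_name_spec : Claim_equal_resolve_atom_name := by
  intro atom_name residue_id available_atoms _
  unfold Spec_resolve_atom_name resolve_atom_name resolve_atom_name_alt
  cases available_atoms with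
  | none => rfl
  | some atoms =>
    cases ATOM_ALIAS_MAP.get? atom_name with
    | none => rfl
    | some cands =>
      simp only []
      rw [firstInSet_eq_find cands _ atom_name _ (contains_get_atoms residue_id atoms)]
      rw [show (fun (b : Nat) (p : Int × String) => if p.1 == residue_id && cands.contains p.2
                    then min b (cands.idxOf p.2) else b) = pvStep residue_id cands from rfl]
      rw [foldl_eq_findIdx residue_id cands atoms]
      exact (findIdx_getD_eq_find _ atom_name cands).symm
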